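-- pv_equiv track=rewrite | github.com/JackRubiralta/Teeko-Solver | new_encode.py | encode_position
-- ===== SOURCE A (Python) =====
-- import math
--
-- def combination_index(comb, n):
--     """
--     Computes the lexicographical index of the combination 'comb' among all combinations
--     of len(comb) elements from n elements.
--     """
--     index = 0
--     k = len(comb)
--     for i in range(k):
--         x = comb[i]
--         if i == 0:
--             start = 0
--         else:
--             start = comb[i - 1] + 1
--         for j in range(start, x):
--             index += math.comb(n - j - 1, k - i - 1)
--     return index
--
-- def encode_position(position):
--     """
--     Encodes a Teeko game position into a unique number.
--     """
--     # Extract occupied positions S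
--     S = [i for i, disc in enumerate(position) if disc != 0]
--     S.sort()
--     k = combination_index(S, 25)
--
--     # Extract red disc positions R within S
--     R = [S.index(i) for i in S if position[i] == 1]
--     R.sort()
--     l = combination_index(R, 8)
--
--     # Compute final encoding number N
--     N = k * math.comb(8, 4) + l
--     return N
-- ===== SOURCE B (Python) =====
-- import math
--
-- def _comb_rank(comb, n):
--     # hockey-stick closed form: C(n-start, m) - C(n-x, m) replaces the cell-by-cell scan;
--     # each element is paired with its predecessor via zip, no running state.
--     k = len(comb)
--     return sum(math.comb(n - p - 1, k - i) - math.comb(n - x, k - i)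
--                for i, (x, p) in enumerate(zip(comb, [-1] + comb))
--                if x > p + 1)
--
-- def encode_position(position):
--     S = [i for i, disc in enumerate(position) if disc != 0]
--     k = _comb_rank(S, 25)
--     R = [r for r, i in enumerate(S) if position[i] == 1]
--     l = _comb_rank(R, 8)
--     return k * math.comb(8, 4) + l
-- ===== Notes on version B (the rewrite author's own statement) =====
-- stated objective: alternative
-- what changed: combination_index's stateful nested scan (one math.comb per skipped cell, running start) is replaced by a stateless sum over each element zipped with its predecessor using the hockey-stick closed form (two math.comb calls per element), and the quadratic S.index(i) comprehension for red ranks by a single enumerate pass.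
import Mathlib
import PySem

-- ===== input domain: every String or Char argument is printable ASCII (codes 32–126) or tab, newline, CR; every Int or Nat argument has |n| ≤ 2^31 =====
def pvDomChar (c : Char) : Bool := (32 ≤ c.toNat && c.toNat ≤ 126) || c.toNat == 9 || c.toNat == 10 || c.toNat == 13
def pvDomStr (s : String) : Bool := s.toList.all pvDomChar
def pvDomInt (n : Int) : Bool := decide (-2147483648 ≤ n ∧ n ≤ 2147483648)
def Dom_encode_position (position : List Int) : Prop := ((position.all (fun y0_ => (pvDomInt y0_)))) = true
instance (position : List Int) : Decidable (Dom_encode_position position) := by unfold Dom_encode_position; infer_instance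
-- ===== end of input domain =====

-- B replaces A's stateful nested scan by a stateless sum over each element zipped with its
-- predecessor, using the hockey-stick closed form (two binomials per element), and A's
-- quadratic S.index comprehension by an enumerate rank pass (objective: alternative).

-- ===== PORT A =====

-- math.comb n k; exact whenever n ≥ 0 and k ≥ 0 (math.comb raises on negative arguments;
-- Pre_ excludes exactly the inputs where a negative first argument is reached, and k is never negative here)
def pyComb (n k : Int) : Int := (Nat.choose n.toNat k.toNat : Int)

-- 'for i in range(k): x = comb[i]; start = 0 / comb[i-1]+1; for j in range(start, x): index += comb(n-j-1, k-i-1)'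
-- as structural recursion over comb carrying i, the running start (= previous element + 1) and index
def combIndexGo (n k : Int) : Int → Int → Int → List Int → Int
  | _, _, index, [] => index
  | i, start, index, x :: rest =>
      combIndexGo n k (i + 1) (x + 1)
        ((PySem.List.pyRange start x 1).foldl
          (fun index j => index + pyComb (n - j - 1) (k - i - 1)) index) rest

def combination_index (comb : List Int) (n : Int) : Int :=
  combIndexGo n (comb.length : Int) 0 0 0 comb

def encode_position (position : List Int) : Int :=
  let S0 := ((PySem.List.enumerate position 0).filter (fun q => q.2 != 0)).map (·.1)
  let S := PySem.List.sorted S0 (fun x => x) false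
  let k := combination_index S 25
  -- position[i] for i ∈ S is always a valid index (i comes from enumerate), so pyGetD is exact;
  -- S.index(i) for i ∈ S always succeeds, so .getD 0 is exact
  let R0 := (S.filter (fun i => PySem.List.pyGetD position i 0 == 1)).map
              (fun i => ((PySem.List.index? S i).map (fun m => (m : Int))).getD 0)
  let R := PySem.List.sorted R0 (fun x => x) false
  let l := combination_index R 8
  k * pyComb 8 4 + l

-- ===== PORT B =====

-- Source B _comb_rank: 'sum(comb(n-p-1, k-i) - comb(n-x, k-i) for i, (x, p) in enumerate(zip(comb, [-1]+comb)) if x > p+1)'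
def comb_rank (comb : List Int) (n : Int) : Int :=
  let k : Int := (comb.length : Int)
  (PySem.List.enumerate (comb.zip ((-1 : Int) :: comb)) 0).foldl
    (fun acc q =>
      if q.2.1 > q.2.2 + 1 then
        acc + (pyComb (n - q.2.2 - 1) (k - q.1) - pyComb (n - q.2.1) (k - q.1))
      else acc) 0

def encode_position_alt (position : List Int) : Int :=
  let S := ((PySem.List.enumerate position 0).filter (fun q => q.2 != 0)).map (·.1)
  let k := comb_rank S 25
  let R := ((PySem.List.enumerate S 0).filter (fun q => PySem.List.pyGetD position q.2 0 == 1)).map (·.1)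
  let l := comb_rank R 8
  k * pyComb 8 4 + l

-- ===== PRECONDITION & SPEC =====

-- the occupied cells (strictly increasing) of a board, and the occupancy-ranks of its red cells
def pvOcc (p : List Int) : List Int :=
  ((PySem.List.enumerate p 0).filter (fun q => q.2 != 0)).map (·.1)
def pvRedRanks (p : List Int) : List Int :=
  ((PySem.List.enumerate (pvOcc p) 0).filter (fun q => PySem.List.pyGetD p q.2 0 == 1)).map (·.1)

-- scan of a strictly increasing list: every element that exceeds n must immediately follow its predecessor
def pvNoRaise (n : Int) : Int → List Int → Bool
  | _, [] => true
  | start, x :: rest => (decide (start < x → x ≤ n)) && pvNoRaise n (x + 1) rest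

-- Pre_ excludes EXACTLY the inputs on which A raises ValueError (math.comb with a negative first
-- argument): an occupied cell at index ≥ 26 not immediately following an occupied cell, or a red
-- disc of occupancy-rank ≥ 9 not immediately following a red one.  A returns on every other input.
def Pre_encode_position (position : List Int) : Prop :=
  pvNoRaise 25 0 (pvOcc position) = true ∧ pvNoRaise 8 0 (pvRedRanks position) = true
instance (position : List Int) : Decidable (Pre_encode_position position) := by
  unfold Pre_encode_position; infer_instance

def pvWitness_encode_position : List Int :=
  [1, 2, 0, 1, 2, 0, 0, 1, 2, 0, 0, 0, 1, 2, 0, 0, 0, 0, 0, 0, 0, 0, 0, 0, 0]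

def Spec_encode_position (position : List Int) (out : Int) : Prop := out = encode_position_alt position
instance (position : List Int) (out : Int) : Decidable (Spec_encode_position position out) := by
  unfold Spec_encode_position; infer_instance

-- ===== CLAIM (what is proved, stated in full; the proofs are below) =====
def Claim_equal_encode_position : Prop :=
  ∀ (position : List Int), Dom_encode_position position → Pre_encode_position position →
    Spec_encode_position position (encode_position position)

-- ===== LEMMAS AND PROOFS =====

-- Pascal's rule for pyComb
theorem pyComb_pascal (a m : Int) (ha : 0 ≤ a) (hm : 1 ≤ m) :
    pyComb (a + 1) m = pyComb a m + pyComb a (m - 1) := by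
  unfold pyComb
  have h1 : (a + 1).toNat = a.toNat + 1 := by omega
  have h2 : m.toNat = (m - 1).toNat + 1 := by omega
  rw [h1, h2, Nat.choose_succ_succ]
  push_cast
  ring

-- hockey-stick: the inner scan of A equals B's two-binomial difference
theorem sumRange (n m : Int) (hm : 1 ≤ m) :
    ∀ (d : Nat) (start x c : Int), (x - start).toNat = d → (start < x → x ≤ n) →
      (PySem.List.pyRange start x 1).foldl (fun index j => index + pyComb (n - j - 1) (m - 1)) c
        = if start < x then c + (pyComb (n - start) m - pyComb (n - x) m) else c := by
  intro d
  induction d with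
  | zero =>
    intro start x c hd _
    have hxs : x ≤ start := by omega
    rw [PySem.List.pyRange_one_eq_nil hxs, if_neg (not_lt.mpr hxs), List.foldl_nil]
  | succ d ih =>
    intro start x c hd hnr
    have hlt : start < x := by omega
    have hxn : x ≤ n := hnr hlt
    rw [PySem.List.pyRange_one_cons hlt]
    simp only [List.foldl_cons]
    rw [ih (start + 1) x (c + pyComb (n - start - 1) (m - 1)) (by omega)
        (fun _ => hxn)]
    have hps : pyComb (n - start) m = pyComb (n - start - 1) m + pyComb (n - start - 1) (m - 1) := by
      have := pyComb_pascal (n - start - 1) m (by omega) hm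
      rw [show n - start - 1 + 1 = n - start by ring] at this
      exact this
    rw [show n - (start + 1) = n - start - 1 by ring]
    by_cases h2 : start + 1 < x
    · rw [if_pos h2, if_pos hlt]
      linarith [hps]
    · have hx1 : n - x = n - start - 1 := by omega
      rw [if_neg h2, if_pos hlt, hx1]
      linarith [hps]

-- A's stateful scan equals B's predecessor-zip fold on any suffix (start − 1 plays the predecessor)
theorem goEq (n k : Int) : ∀ (rest : List Int) (i start c : Int),
    k = i + rest.length → pvNoRaise n start rest = true →
    combIndexGo n k i start c rest =
      (PySem.List.enumerate (rest.zip ((start - 1) :: rest)) i).foldl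
        (fun acc q =>
          if q.2.1 > q.2.2 + 1 then
            acc + (pyComb (n - q.2.2 - 1) (k - q.1) - pyComb (n - q.2.1) (k - q.1))
          else acc) c := by
  intro rest
  induction rest with
  | nil => intro i start c _ _; rfl
  | cons x r ih =>
    intro i start c hk hnr
    unfold pvNoRaise at hnr
    rw [Bool.and_eq_true, decide_eq_true_eq] at hnr
    obtain ⟨h1, h2⟩ := hnr
    have hm : 1 ≤ k - i := by simp at hk; omega
    unfold combIndexGo
    rw [sumRange n (k - i) hm (x - start).toNat start x c rfl h1]
    rw [List.zip_cons_cons, PySem.List.enumerate_cons, List.foldl_cons]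
    have hih := ih (i + 1) (x + 1)
        (if start < x then c + (pyComb (n - start) (k - i) - pyComb (n - x) (k - i)) else c)
        (by simp at hk ⊢; omega) h2
    rw [show x + 1 - 1 = x by ring] at hih
    simp only [show start - 1 + 1 = start by ring, show n - (start - 1) - 1 = n - start by ring]
    exact hih

theorem combination_index_eq (comb : List Int) (n : Int)
    (h : pvNoRaise n 0 comb = true) :
    combination_index comb n = comb_rank comb n := by
  unfold combination_index comb_rank
  have := goEq n (comb.length : Int) comb 0 0 0 (by simp) h
  simpa using this

-- the occupied-cell list is strictly increasing
theorem pvOcc_pairwise (p : List Int) : (pvOcc p).Pairwise (· < ·) := by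
  unfold pvOcc
  exact ((PySem.List.pairwise_lt_enumerate p 0).filter _).map _ (fun _ _ h => h)

theorem redRanks_pairwise (p : List Int) : (pvRedRanks p).Pairwise (· < ·) := by
  unfold pvRedRanks
  exact ((PySem.List.pairwise_lt_enumerate (pvOcc p) 0).filter _).map _ (fun _ _ h => h)

-- A's '[S.index(i) for i in S if c(i)]' is the enumerate-rank list of B, for S without duplicates
theorem index_filter_map (c : Int → Bool) :
    ∀ (S : List Int) (s : Int), S.Nodup →
      (S.filter c).map (fun i => s + ((PySem.List.index? S i).map (fun m => (m : Int))).getD 0)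
        = ((PySem.List.enumerate S s).filter (fun q => c q.2)).map (·.1) := by
  intro S
  induction S with
  | nil => intro s _; simp [PySem.List.enumerate_nil]
  | cons x r ih =>
    intro s hnd
    rw [List.nodup_cons] at hnd
    obtain ⟨hx, hnd⟩ := hnd
    rw [PySem.List.enumerate_cons]
    have htail : (r.filter c).map
          (fun i => s + ((PySem.List.index? (x :: r) i).map (fun m => (m : Int))).getD 0)
        = ((PySem.List.enumerate r (s + 1)).filter (fun q => c q.2)).map (·.1) := by
      rw [← ih (s + 1) hnd]
      apply List.map_congr_left
      intro i hi
      have hir : i ∈ r := (List.mem_filter.mp hi).1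
      have hne : x ≠ i := fun he => hx (he ▸ hir)
      rw [PySem.List.index?_cons_of_ne r hne]
      have hsome : PySem.List.index? r i ≠ none := fun h =>
        ((PySem.List.index?_eq_none_iff r i).mp h) hir
      obtain ⟨m, hm⟩ := Option.ne_none_iff_exists'.mp hsome
      rw [hm]
      simp
      ring
    by_cases hc : c x
    · rw [List.filter_cons_of_pos hc, List.filter_cons_of_pos (by simpa using hc)]
      rw [List.map_cons, List.map_cons, PySem.List.index?_cons_self, htail]
      simp
    · rw [List.filter_cons_of_neg hc, List.filter_cons_of_neg (by simpa using hc)]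
      exact htail

-- ===== VERDICT (by name: the statement is the Claim_ definition above) =====
theorem encode_position_spec : Claim_equal_encode_position := by
  intro p _ hpre
  obtain ⟨h1, h2⟩ := hpre
  unfold Spec_encode_position
  simp only [encode_position, encode_position_alt]
  have hSp : (pvOcc p).Pairwise (· < ·) := pvOcc_pairwise p
  have hS : PySem.List.sorted (pvOcc p) (fun x => x) false = pvOcc p :=
    PySem.List.sorted_eq_of_perm_of_pairwise_lt (pvOcc p) (pvOcc p) (fun x => x) (List.Perm.refl _) hSp
  rw [show ((PySem.List.enumerate p 0).filter (fun q => q.2 != 0)).map (·.1) = pvOcc p from rfl, hS]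
  have hnodup : (pvOcc p).Nodup := hSp.imp (fun h => ne_of_lt h)
  have hR0 : ((pvOcc p).filter (fun i => PySem.List.pyGetD p i 0 == 1)).map
        (fun i => ((PySem.List.index? (pvOcc p) i).map (fun m => (m : Int))).getD 0) = pvRedRanks p := by
    have := index_filter_map (fun i => PySem.List.pyGetD p i 0 == 1) (pvOcc p) 0 hnodup
    simpa [pvRedRanks] using this
  rw [hR0]
  have hRsort : PySem.List.sorted (pvRedRanks p) (fun x => x) false = pvRedRanks p :=
    PySem.List.sorted_eq_of_perm_of_pairwise_lt (pvRedRanks p) (pvRedRanks p) (fun x => x) (List.Perm.refl _) (redRanks_pairwise p)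
  rw [hRsort, combination_index_eq _ _ h1, combination_index_eq _ _ h2]
  rfl
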